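-- pv_equiv track=rewrite | github.com/posl/comment_recommendation | script/mod_gen/2_time/zh/200_B/5.py | func
-- ===== SOURCE A (Python) =====
-- def func(N,K):
--     for i in range(K):
--         if N%200==0:
--             N=N//200
--         else:
--             N=str(N)
--             N=N+'200'
--             N=int(N)
--     return N
-- ===== SOURCE B (Python) =====
-- def func(N, K):
--     # Collapse the prefix of divide-by-200 steps (at most a handful, since
--     # |N| shrinks by 200x each time), then apply the closed form: once N is
--     # not divisible by 200, the loop alternates append/divide, and each
--     # append+divide pair maps N -> 5*N + 1 (positive N) or 5*N - 1 (negative N).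
--     k = K
--     while k > 0 and N != 0 and N % 200 == 0:
--         N //= 200
--         k -= 1
--     if k <= 0 or N == 0:
--         return N
--     m, r = divmod(k, 2)
--     p = 5 ** m
--     q = (p - 1) // 4
--     if N > 0:
--         N = p * N + q
--         if r:
--             N = 1000 * N + 200
--     else:
--         N = p * N - q
--         if r:
--             N = 1000 * N - 200
--     return N
-- ===== Notes on version B (the rewrite author's own statement) =====
-- stated objective: faster
-- what changed: A simulates all K steps on an ever-growing bigint (append '200' / divide by 200 one step at a time); B collapses the short divide-by-200 prefix with a small loop and then replaces the remaining steps by the closed form 5^m*N +- (5^m-1)/4 (each append+divide pair is N -> 5N+-1), computed with one pow and O(1) bigint operations.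
import Mathlib
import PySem

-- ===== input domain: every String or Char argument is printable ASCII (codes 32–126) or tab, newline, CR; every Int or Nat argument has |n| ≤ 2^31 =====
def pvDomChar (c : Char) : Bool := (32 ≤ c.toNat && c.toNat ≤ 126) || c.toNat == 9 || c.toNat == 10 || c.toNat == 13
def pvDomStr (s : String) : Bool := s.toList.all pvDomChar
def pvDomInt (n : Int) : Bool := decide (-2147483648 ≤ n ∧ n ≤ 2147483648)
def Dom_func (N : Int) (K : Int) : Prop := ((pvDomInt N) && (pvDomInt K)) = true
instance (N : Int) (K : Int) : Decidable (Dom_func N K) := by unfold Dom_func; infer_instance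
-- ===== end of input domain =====

-- B replaces A's K-step big-integer simulation by a short divide-prefix loop plus the
-- closed form 5^m*N ± (5^m-1)/4 (one pow), since each append+divide pair is N ↦ 5N±1 (faster).

-- ===== PORT A =====

-- Hand port of Python's `int(s)` restricted to the strings this program builds
-- (str(N) + '200': an optionally-signed, non-empty ASCII-digit string with no
-- whitespace/underscores) — exact there: optional sign, then the decimal fold.
-- (PySem.Int.ofStr? computes the same value, but its parser core is a private
-- definition that proofs cannot unfold, so this call site is ported by hand.)
def pvStep (a : Int) (c : Char) : Int := a * 10 + ((c.toNat : Int) - 48)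

def pvIntChars (cs : List Char) : Int :=
  if cs.head? = some '-' then -(List.foldl pvStep 0 (cs.drop 1))
  else if cs.head? = some '+' then List.foldl pvStep 0 (cs.drop 1)
  else List.foldl pvStep 0 cs

-- one iteration of A's loop body (the loop index i is unused by the body).
-- The three string statements N=str(N); N=N+'200'; N=int(N) are ported at the
-- List Char level ('200' = ['2','0','0']), as Lean's own String ops are opaque.
def funcStep (N : Int) : Int :=
  if PySem.Int.mod N 200 = 0 then PySem.Int.floordiv N 200
  else pvIntChars (PySem.Int.toChars N ++ ['2', '0', '0'])

-- `for i in range(K)` over the state N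
def funcLoop : Nat → Int → Int
  | 0, N => N
  | k + 1, N => funcLoop k (funcStep N)

def func (N : Int) (K : Int) : Int := funcLoop K.toNat N

-- ===== PORT B =====

-- Source B's `while k > 0 and N != 0 and N % 200 == 0: N //= 200; k -= 1`
-- (returns the final N together with the remaining k)
def altPrefix : Nat → Int → Int × Nat
  | 0, N => (N, 0)
  | k + 1, N =>
    if N ≠ 0 ∧ PySem.Int.mod N 200 = 0 then altPrefix k (PySem.Int.floordiv N 200)
    else (N, k + 1)

def func_alt (N : Int) (K : Int) : Int :=
  let P := altPrefix K.toNat N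
  let N' := P.1
  let k := P.2
  if k = 0 ∨ N' = 0 then N'
  else
    let m := k / 2
    let r := k % 2
    let p : Int := 5 ^ m
    let q := PySem.Int.floordiv (p - 1) 4
    if 0 < N' then
      if r = 1 then 1000 * (p * N' + q) + 200 else p * N' + q
    else
      if r = 1 then 1000 * (p * N' - q) - 200 else p * N' - q

-- ===== PRECONDITION & SPEC =====
def Spec_func (N : Int) (K : Int) (out : Int) : Prop := out = func_alt N K
instance (N : Int) (K : Int) (out : Int) : Decidable (Spec_func N K out) := by unfold Spec_func; infer_instance

-- ===== CLAIM (what is proved, stated in full; the proofs are below) =====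
def Claim_equal_func : Prop := ∀ (N : Int) (K : Int), Dom_func N K → Spec_func N K (func N K)

-- ===== LEMMAS AND PROOFS =====

-- decimal digits of a natural number, most significant first (proof-side model of Nat.toDigits 10)
def pvND (n : Nat) : List Char :=
  if _h : n < 10 then [Nat.digitChar n]
  else pvND (n / 10) ++ [Nat.digitChar (n % 10)]
decreasing_by exact Nat.div_lt_self (by omega) (by omega)

lemma pvND_lt {n : Nat} (h : n < 10) : pvND n = [Nat.digitChar n] := by
  rw [pvND, dif_pos h]

lemma pvND_ge {n : Nat} (h : ¬ n < 10) :
    pvND n = pvND (n / 10) ++ [Nat.digitChar (n % 10)] := by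
  conv_lhs => rw [pvND]
  rw [dif_neg h]

lemma pvND_toDigitsCore : ∀ (f n : Nat) (ds : List Char), n < f →
    Nat.toDigitsCore 10 f n ds = pvND n ++ ds := by
  intro f
  induction f with
  | zero => intro n ds h; omega
  | succ f ih =>
    intro n ds h
    rw [Nat.toDigitsCore]
    by_cases h10 : n < 10
    · have hz : n / 10 = 0 := Nat.div_eq_of_lt h10
      have hm : n % 10 = n := Nat.mod_eq_of_lt h10
      simp [hz, hm, pvND_lt h10]
    · have hz : ¬ n / 10 = 0 := by
        intro hz; exact h10 (by omega : n < 10)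
      simp only [if_neg hz]
      rw [ih (n / 10) _ (by omega), pvND_ge h10]
      simp

lemma pvND_eq_toDigits (n : Nat) : Nat.toDigits 10 n = pvND n := by
  have := pvND_toDigitsCore (n + 1) n [] (by omega)
  simpa [Nat.toDigits] using this

lemma digitChar_toNat {d : Nat} (h : d < 10) : (Nat.digitChar d).toNat = 48 + d := by
  interval_cases d <;> decide

lemma digitChar_ne_sign {d : Nat} (h : d < 10) :
    Nat.digitChar d ≠ '-' ∧ Nat.digitChar d ≠ '+' := by
  interval_cases d <;> exact ⟨by decide, by decide⟩

lemma pvND_cons (n : Nat) : ∃ d t, d < 10 ∧ pvND n = Nat.digitChar d :: t := by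
  induction n using Nat.strong_induction_on with
  | _ n ih =>
    by_cases h : n < 10
    · exact ⟨n, [], h, by rw [pvND_lt h]⟩
    · obtain ⟨d, t, hd, ht⟩ := ih (n / 10) (Nat.div_lt_self (by omega) (by omega))
      refine ⟨d, t ++ [Nat.digitChar (n % 10)], hd, ?_⟩
      rw [pvND_ge h, ht]; rfl

lemma fold_pvND : ∀ n : Nat, ∀ acc : Int,
    List.foldl pvStep acc (pvND n) = acc * (10 : Int) ^ (pvND n).length + n := by
  intro n
  induction n using Nat.strong_induction_on with
  | _ n ih =>
    intro acc
    by_cases h : n < 10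
    · rw [pvND_lt h]
      simp only [List.foldl_cons, List.foldl_nil, List.length_singleton]
      rw [pvStep, digitChar_toNat h]
      push_cast; ring
    · rw [pvND_ge h]
      simp only [List.foldl_append, List.foldl_cons, List.foldl_nil,
        List.length_append, List.length_singleton]
      rw [ih (n / 10) (Nat.div_lt_self (by omega) (by omega)) acc]
      rw [pvStep, digitChar_toNat (Nat.mod_lt n (by omega))]
      have hn : (10 : Int) * ((n / 10 : Nat) : Int) + ((n % 10 : Nat) : Int) = (n : Int) := by
        omega
      calc (acc * 10 ^ (pvND (n / 10)).length + ((n / 10 : Nat) : Int)) * 10 +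
              (((48 + n % 10 : Nat) : Int) - 48)
          = acc * (10 ^ (pvND (n / 10)).length * 10) +
              ((10 : Int) * ((n / 10 : Nat) : Int) + ((n % 10 : Nat) : Int)) := by
            push_cast; ring
        _ = acc * 10 ^ ((pvND (n / 10)).length + 1) + (n : Int) := by
            rw [hn, pow_succ]

lemma fold200 (x : Int) : pvStep (pvStep (pvStep x '2') '0') '0' = 1000 * x + 200 := by
  simp only [pvStep, show ((('2' : Char).toNat : Int)) = 50 from rfl,
    show ((('0' : Char).toNat : Int)) = 48 from rfl]
  ring

-- int(str(N) + '200') in closed form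
lemma pvInt_append (N : Int) :
    pvIntChars (PySem.Int.toChars N ++ ['2', '0', '0']) =
      if 0 ≤ N then 1000 * N + 200 else 1000 * N - 200 := by
  by_cases h : N < 0
  · have hcons : PySem.Int.toChars N ++ ['2', '0', '0']
        = '-' :: (pvND N.natAbs ++ ['2', '0', '0']) := by
      rw [PySem.Int.toChars, if_pos h, pvND_eq_toDigits]; rfl
    rw [hcons, pvIntChars]
    rw [if_pos (show ('-' :: (pvND N.natAbs ++ ['2', '0', '0'])).head? = some '-' from rfl)]
    simp only [List.drop_succ_cons, List.drop_zero]
    rw [List.foldl_append, fold_pvND, zero_mul, zero_add]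
    simp only [List.foldl_cons, List.foldl_nil]
    rw [fold200, Int.ofNat_natAbs_of_nonpos (by omega), if_neg (by omega)]
    ring
  · obtain ⟨d, t, hd, ht⟩ := pvND_cons N.toNat
    have hcons : PySem.Int.toChars N ++ ['2', '0', '0']
        = Nat.digitChar d :: (t ++ ['2', '0', '0']) := by
      rw [PySem.Int.toChars, if_neg h, pvND_eq_toDigits, ht]; rfl
    rw [hcons, pvIntChars]
    simp only [List.head?_cons]
    rw [if_neg (by simpa using (digitChar_ne_sign hd).1),
      if_neg (by simpa using (digitChar_ne_sign hd).2)]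
    rw [show Nat.digitChar d :: (t ++ ['2', '0', '0'])
        = pvND N.toNat ++ ['2', '0', '0'] from by rw [ht]; rfl]
    rw [List.foldl_append, fold_pvND, zero_mul, zero_add]
    simp only [List.foldl_cons, List.foldl_nil]
    rw [fold200, Int.toNat_of_nonneg (by omega), if_pos (by omega)]

-- exact division by a positive literal
lemma fd4 (x t : Int) (h : x = 4 * t) : PySem.Int.floordiv x 4 = t := by
  rw [PySem.Int.floordiv_eq_ediv_of_pos (by norm_num), h,
    Int.mul_ediv_cancel_left _ (by norm_num)]

lemma dvd4 (m : Nat) : (4 : Int) ∣ 5 ^ m - 1 := by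
  induction m with
  | zero => simp
  | succ m ih =>
    obtain ⟨t, ht⟩ := ih
    exact ⟨5 * t + 1, by rw [pow_succ]; linarith⟩

lemma funcStep_dvd (N c : Int) (h : N = 200 * c) : funcStep N = c := by
  have hm : PySem.Int.mod N 200 = 0 :=
    (PySem.Int.mod_eq_zero_iff_dvd N 200).mpr ⟨c, h⟩
  rw [funcStep, if_pos hm, h, PySem.Int.floordiv_eq_ediv_of_pos (by norm_num),
    Int.mul_ediv_cancel_left _ (by norm_num)]

lemma funcStep_parse (N : Int) (h : PySem.Int.mod N 200 ≠ 0) :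
    funcStep N = if 0 ≤ N then 1000 * N + 200 else 1000 * N - 200 := by
  rw [funcStep, if_neg h, pvInt_append]

lemma mod_ne_shift (N : Int) :
    PySem.Int.mod (5 * N + 1) 200 ≠ 0 := by
  intro hc
  obtain ⟨c, hc⟩ := (PySem.Int.mod_eq_zero_iff_dvd _ 200).mp hc
  omega

lemma funcStep_neg (N : Int) : funcStep (-N) = -funcStep N := by
  by_cases hd : (200 : Int) ∣ N
  · obtain ⟨c, hc⟩ := hd
    rw [funcStep_dvd N c hc, funcStep_dvd (-N) (-c) (by omega)]
  · have hN : N ≠ 0 := by rintro rfl; exact hd ⟨0, by ring⟩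
    have h1 : PySem.Int.mod N 200 ≠ 0 := by
      intro hc; exact hd ((PySem.Int.mod_eq_zero_iff_dvd N 200).mp hc)
    have h2 : PySem.Int.mod (-N) 200 ≠ 0 := by
      intro hc
      obtain ⟨c, hc⟩ := (PySem.Int.mod_eq_zero_iff_dvd (-N) 200).mp hc
      exact hd ⟨-c, by omega⟩
    rw [funcStep_parse N h1, funcStep_parse (-N) h2]
    rcases lt_trichotomy N 0 with h | h | h
    · rw [if_pos (show (0 : Int) ≤ -N by omega), if_neg (show ¬ (0 : Int) ≤ N by omega)]
      ring
    · exact absurd h hN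
    · rw [if_neg (show ¬ (0 : Int) ≤ -N by omega), if_pos (show (0 : Int) ≤ N by omega)]
      ring

lemma funcLoop_neg : ∀ (k : Nat) (N : Int), funcLoop k (-N) = -funcLoop k N := by
  intro k
  induction k with
  | zero => intro N; rfl
  | succ k ih =>
    intro N
    show funcLoop k (funcStep (-N)) = -funcLoop k (funcStep N)
    rw [funcStep_neg, ih]

lemma funcLoop_zero (k : Nat) : funcLoop k 0 = 0 := by
  induction k with
  | zero => rfl
  | succ k ih =>
    show funcLoop k (funcStep 0) = 0
    rw [funcStep_dvd 0 0 (by ring)]; exact ih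

-- the closed form for the alternating phase, positive N
lemma pairP : ∀ k : Nat, ∀ N : Int, 0 < N → PySem.Int.mod N 200 ≠ 0 →
    funcLoop k N =
      (if k % 2 = 1
       then 1000 * ((5 : Int) ^ (k / 2) * N + PySem.Int.floordiv ((5 : Int) ^ (k / 2) - 1) 4) + 200
       else (5 : Int) ^ (k / 2) * N + PySem.Int.floordiv ((5 : Int) ^ (k / 2) - 1) 4) := by
  intro k
  induction k using Nat.strong_induction_on with
  | _ k ih =>
    match k with
    | 0 =>
      intro N h0 hm
      rw [funcLoop]
      have hfd : PySem.Int.floordiv ((5 : Int) ^ (0 / 2) - 1) 4 = 0 := fd4 _ 0 (by norm_num)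
      rw [hfd]
      norm_num
    | 1 =>
      intro N h0 hm
      show funcLoop 0 (funcStep N) = _
      rw [funcLoop, funcStep_parse N hm, if_pos (by omega)]
      have hfd : PySem.Int.floordiv ((5 : Int) ^ (1 / 2) - 1) 4 = 0 := fd4 _ 0 (by norm_num)
      rw [hfd]
      norm_num
    | (k + 2) =>
      intro N h0 hm
      have h1 : funcStep N = 1000 * N + 200 := by
        rw [funcStep_parse N hm, if_pos (by omega)]
      have h2 : funcStep (1000 * N + 200) = 5 * N + 1 :=
        funcStep_dvd _ _ (by ring)
      have hstep : funcLoop (k + 2) N = funcLoop k (5 * N + 1) := by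
        show funcLoop (k + 1) (funcStep N) = _
        rw [h1]
        show funcLoop k (funcStep (1000 * N + 200)) = _
        rw [h2]
      rw [hstep, ih k (by omega) (5 * N + 1) (by omega) (mod_ne_shift N)]
      obtain ⟨t, ht⟩ := dvd4 (k / 2)
      have hq : PySem.Int.floordiv ((5 : Int) ^ (k / 2) - 1) 4 = t := fd4 _ t (by linarith)
      have hq2 : PySem.Int.floordiv ((5 : Int) ^ ((k + 2) / 2) - 1) 4 = 5 * t + 1 := by
        apply fd4
        have h22 : (k + 2) / 2 = k / 2 + 1 := by omega
        rw [h22, pow_succ]; linarith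
      have hp2 : (k + 2) % 2 = k % 2 := by omega
      have h22 : (k + 2) / 2 = k / 2 + 1 := by omega
      rw [hq, hq2, hp2, h22, pow_succ]
      by_cases hr : k % 2 = 1
      · rw [if_pos hr, if_pos hr]; linear_combination (1000 : Int) * ht
      · rw [if_neg hr, if_neg hr]; linear_combination ht

lemma prefix_eq : ∀ (k : Nat) (N : Int),
    funcLoop k N = funcLoop (altPrefix k N).2 (altPrefix k N).1 := by
  intro k
  induction k with
  | zero => intro N; rfl
  | succ k ih =>
    intro N
    by_cases h : N ≠ 0 ∧ PySem.Int.mod N 200 = 0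
    · rw [altPrefix, if_pos h]
      have hs : funcStep N = PySem.Int.floordiv N 200 := by rw [funcStep, if_pos h.2]
      show funcLoop k (funcStep N) = _
      rw [hs]; exact ih _
    · rw [altPrefix, if_neg h]

lemma prefix_inv : ∀ (k : Nat) (N : Int), (altPrefix k N).2 ≠ 0 →
    (altPrefix k N).1 = 0 ∨ PySem.Int.mod (altPrefix k N).1 200 ≠ 0 := by
  intro k
  induction k with
  | zero => intro N h; exact absurd rfl h
  | succ k ih =>
    intro N h
    by_cases hc : N ≠ 0 ∧ PySem.Int.mod N 200 = 0
    · rw [altPrefix, if_pos hc] at h ⊢; exact ih _ h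
    · rw [altPrefix, if_neg hc]
      by_cases hN : N = 0
      · exact Or.inl hN
      · exact Or.inr (fun hmm => hc ⟨hN, hmm⟩)

-- ===== VERDICT (by name: the statement is the Claim_ definition above) =====
theorem func_spec : Claim_equal_func := by
  intro N K _
  show func N K = func_alt N K
  rw [func, func_alt]
  have hpre := prefix_eq K.toNat N
  have hinv := prefix_inv K.toNat N
  set P := altPrefix K.toNat N with hP
  obtain ⟨N', k'⟩ := P
  simp only at hpre hinv ⊢
  rw [hpre]
  by_cases hk : k' = 0
  · rw [if_pos (Or.inl hk), hk, funcLoop]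
  · rcases hinv hk with hN0 | hm
    · rw [if_pos (Or.inr hN0), hN0, funcLoop_zero]
    · have hN0 : N' ≠ 0 := by
        intro hc
        apply hm
        rw [hc]
        exact (PySem.Int.mod_eq_zero_iff_dvd 0 200).mpr ⟨0, by ring⟩
      rw [if_neg (by tauto)]
      rcases lt_trichotomy N' 0 with hs | hs | hs
      · have hmneg : PySem.Int.mod (-N') 200 ≠ 0 := by
          intro hc
          obtain ⟨c, hc⟩ := (PySem.Int.mod_eq_zero_iff_dvd (-N') 200).mp hc
          exact hm ((PySem.Int.mod_eq_zero_iff_dvd N' 200).mpr ⟨-c, by omega⟩)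
        have := pairP k' (-N') (by omega) hmneg
        have hL : funcLoop k' N' = -funcLoop k' (-N') := by
          rw [funcLoop_neg, neg_neg]
        rw [hL, this, if_neg (show ¬ 0 < N' from by omega)]
        by_cases hr : k' % 2 = 1
        · rw [if_pos hr, if_pos hr]; ring
        · rw [if_neg hr, if_neg hr]; ring
      · exact absurd hs hN0
      · rw [pairP k' N' hs hm, if_pos hs]
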